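-- pv_equiv track=rewrite | github.com/BorisovDm/Hyperskill_projects | Smart_Calculator/stage_5.py | eval_line
-- ===== SOURCE A (Python) =====
-- def eval_line(s):
--     parts = s.split()
--
--     if len(parts) % 2 != 1:
--         raise ValueError
--
--     line_value = 0
--     sign = 1
--
--     for idx, elem in enumerate(parts):
--         if idx % 2 == 0:  # number
--             line_value += sign * int(elem)
--             sign = 1
--
--         else:  # plus/minus
--             for jdx in elem:
--                 if jdx == '+':
--                     sign *= 1
--                 elif jdx == '-':
--                     sign *= -1
--                 else:
--                     raise ValueError
--
--     return line_value
-- ===== SOURCE B (Python) =====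
-- def eval_line(s):
--     parts = s.split()
--
--     if len(parts) % 2 != 1:
--         raise ValueError
--
--     nums = parts[0::2]
--     ops = parts[1::2]
--
--     for op in ops:
--         if set(op) - {'+', '-'}:
--             raise ValueError
--
--     signs = [1] + [(-1) ** op.count('-') for op in ops]
--
--     plus = sum(int(n) for g, n in zip(signs, nums) if g > 0)
--     minus = sum(int(n) for g, n in zip(signs, nums) if g < 0)
--
--     return plus - minus
-- ===== Notes on version B (the rewrite author's own statement) =====
-- stated objective: alternative
-- what changed: A makes one enumerate pass branching on index parity with a carried sign it multiplies character by character; B instead stages the work: it splits the tokens by index parity into number and operator slices, precomputes a closed-form (-1)**count('-') sign list, partitions the numbers into an added group and a subtracted group, sums each group separately and returns the single difference plus - minus.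
import Mathlib
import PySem

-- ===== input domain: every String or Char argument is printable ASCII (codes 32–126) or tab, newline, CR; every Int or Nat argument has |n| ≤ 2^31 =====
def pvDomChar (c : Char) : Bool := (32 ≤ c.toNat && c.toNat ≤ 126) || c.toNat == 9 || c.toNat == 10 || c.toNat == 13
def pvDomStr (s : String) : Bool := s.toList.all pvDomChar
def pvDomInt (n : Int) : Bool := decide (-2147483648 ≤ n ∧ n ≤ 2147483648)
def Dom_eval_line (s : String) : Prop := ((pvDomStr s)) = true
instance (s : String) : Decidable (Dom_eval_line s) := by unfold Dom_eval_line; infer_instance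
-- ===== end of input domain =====

-- B replaces A's single carried-sign enumerate pass by staged passes: parity slices parts[0::2]/parts[1::2], a closed-form (-1)**count('-') sign list, and two group sums whose difference is returned (different decomposition, same cost).


-- ===== PORT A =====
-- On inputs where the Python raises ValueError (even token count, a non-'+'/'-' char
-- in an operator token, a number token int() rejects) the port just keeps folding and
-- returns a junk value; Pre_eval_line excludes exactly those inputs.
def evalStepA (st : Int × Int) (p : Int × String) : Int × Int :=
  if PySem.Int.mod p.1 2 == 0 then
    (st.1 + st.2 * (PySem.Int.ofStr? p.2).getD 0, 1)      -- line_value += sign * int(elem); sign = 1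
  else
    (st.1, p.2.toList.foldl
      (fun sg c => if c == '+' then sg * 1
                   else if c == '-' then sg * (-1)
                   else sg)                                -- Python raises here; excluded by Pre_
      st.2)

def eval_line (s : String) : Int :=
  ((PySem.List.enumerate (PySem.Str.split₀ s) 0).foldl evalStepA (0, 1)).1

-- ===== PORT B =====
-- Source B's op-validation loop only raises (no state); those inputs are outside Pre_eval_line.
def eval_line_alt (s : String) : Int :=
  let parts := PySem.Str.split₀ s
  let nums := (PySem.List.slice? parts (some 0) none 2).getD []      -- parts[0::2]
  let ops := (PySem.List.slice? parts (some 1) none 2).getD []       -- parts[1::2]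
  let signs := (1 : Int) :: ops.map (fun op => (-1 : Int) ^ PySem.Str.count op "-")
  let plus := (((signs.zip nums).filter (fun p => decide (0 < p.1))).map
      (fun p => (PySem.Int.ofStr? p.2).getD 0)).sum
  let minus := (((signs.zip nums).filter (fun p => decide (p.1 < 0))).map
      (fun p => (PySem.Int.ofStr? p.2).getD 0)).sum
  plus - minus

-- ===== PRECONDITION & SPEC =====
-- Pre_ admits exactly the inputs on which the Python A returns: an odd number of
-- whitespace-split tokens, every even-position token accepted by int(), every
-- odd-position token made only of '+'/'-'.
def Pre_eval_line (s : String) : Prop :=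
  ((PySem.Str.split₀ s).length % 2 == 1 &&
   (PySem.List.enumerate (PySem.Str.split₀ s) 0).all (fun p =>
      if PySem.Int.mod p.1 2 == 0 then (PySem.Int.ofStr? p.2).isSome
      else p.2.toList.all (fun c => c == '+' || c == '-'))) = true
instance (s : String) : Decidable (Pre_eval_line s) := by unfold Pre_eval_line; infer_instance

def pvWitness_eval_line : String := "10 +- 3 - -2"

def Spec_eval_line (s : String) (out : Int) : Prop := out = eval_line_alt s
instance (s : String) (out : Int) : Decidable (Spec_eval_line s out) := by unfold Spec_eval_line; infer_instance

-- ===== CLAIM (what is proved, stated in full; the proofs are below) =====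
def Claim_equal_eval_line : Prop := ∀ (s : String), Dom_eval_line s → Pre_eval_line s → Spec_eval_line s (eval_line s)

-- ===== LEMMAS AND PROOFS =====

-- Proof-local bridge: the token stream after the first number, grouped two at a time.
def pairsOf (xs : List String) : List (String × String) :=
  match xs with
  | a :: b :: t => (a, b) :: pairsOf t
  | _ => []

-- Proof-local: the value of one (op, num) group.
def pairStep (total : Int) (p : String × String) : Int :=
  if PySem.Str.count p.1 "-" % 2 == 1 then total - (PySem.Int.ofStr? p.2).getD 0
  else total + (PySem.Int.ofStr? p.2).getD 0

-- Pre_'s Boolean per-token check, in the Prop form the loop lemma consumes.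
theorem pre_tok_prop (p : Int × String)
    (h : (if PySem.Int.mod p.1 2 == 0 then (PySem.Int.ofStr? p.2).isSome
          else p.2.toList.all (fun c => c == '+' || c == '-')) = true) :
    if PySem.Int.mod p.1 2 = 0 then (PySem.Int.ofStr? p.2).isSome = true
    else ∀ c ∈ p.2.toList, c = '+' ∨ c = '-' := by
  by_cases hm : PySem.Int.mod p.1 2 = 0
  · simpa [hm] using h
  · rw [if_neg (by simpa using hm)] at h
    rw [if_neg hm]
    simpa using h

-- Python's op.count('-') for the one-char needle is the char count.
theorem count_go_singleton (v : Char) : ∀ (fuel : Nat) (l : List Char) (acc : Nat),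
    l.length ≤ fuel → PySem.Chars.count.go [v] fuel l acc = acc + l.count v := by
  intro fuel
  induction fuel with
  | zero => intro l acc h; cases l with
    | nil => simp [PySem.Chars.count.go]
    | cons a t => simp at h
  | succ n ih =>
    intro l acc h
    cases l with
    | nil => simp [PySem.Chars.count.go]
    | cons a t =>
      by_cases hv : a = v
      · subst hv
        simp [PySem.Chars.count.go, List.isPrefixOf]
        rw [ih t (acc + 1) (by simpa using Nat.le_of_succ_le_succ h)]
        omega
      · have : List.isPrefixOf [v] (a :: t) = false := by
          simp [List.isPrefixOf]; exact fun hh => (hv hh.symm).elim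
        simp [PySem.Chars.count.go, this, hv]
        exact ih t acc (by simpa using Nat.le_of_succ_le_succ h)

theorem chars_count_singleton (cs : List Char) (v : Char) :
    PySem.Chars.count cs [v] = cs.count v := by
  simp [PySem.Chars.count]
  simpa using count_go_singleton v cs.length cs 0 le_rfl

theorem str_count_dash (a : String) : PySem.Str.count a "-" = a.toList.count '-' := by
  rw [PySem.Str.count_eq]
  have : ("-" : String).toList = ['-'] := by decide
  rw [this, chars_count_singleton]

-- A's per-character sign fold, on a valid operator token, is the closed-form '-' parity.
theorem sign_fold (cs : List Char) : ∀ (sg : Int), (∀ c ∈ cs, c = '+' ∨ c = '-') →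
    cs.foldl (fun sg c => if c == '+' then sg * 1
                          else if c == '-' then sg * (-1)
                          else sg) sg
      = sg * (if cs.count '-' % 2 = 1 then -1 else 1) := by
  induction cs with
  | nil => intro sg _; simp
  | cons c t ih =>
    intro sg h
    rcases h c (by simp) with hc | hc <;> subst hc
    · have := ih (sg * 1) (fun c hc => h c (by simp [hc]))
      simp at this ⊢
      rw [this]
    · have := ih (sg * (-1)) (fun c hc => h c (by simp [hc]))
      simp at this ⊢
      rw [this]
      by_cases hp : t.count '-' % 2 = 1
      · have h2 : (t.count '-' + 1) % 2 = 0 := by omega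
        simp [hp, h2]
        try ring
      · have h2 : (t.count '-' + 1) % 2 = 1 := by omega
        simp [hp, h2]
        try ring

-- A-side loop correspondence: from an odd enumerate index on, A's carried-sign fold over
-- the remaining tokens is the fold of pairStep over their (op, num) groups.
theorem main_loop : ∀ (n : Nat) (rest : List String), rest.length ≤ n →
    ∀ (i : Int) (v : Int), PySem.Int.mod i 2 = 1 →
    (∀ p ∈ PySem.List.enumerate rest i,
        if PySem.Int.mod p.1 2 = 0 then (PySem.Int.ofStr? p.2).isSome = true
        else ∀ c ∈ p.2.toList, c = '+' ∨ c = '-') →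
    ((PySem.List.enumerate rest i).foldl evalStepA (v, 1)).1
      = (pairsOf rest).foldl pairStep v := by
  intro n
  induction n with
  | zero =>
    intro rest h i v _ _
    cases rest with
    | nil => simp [PySem.List.enumerate_nil, pairsOf]
    | cons a t => simp at h
  | succ m ih =>
    intro rest h i v hi hall
    have h2 : (0:Int) < 2 := by norm_num
    have hie : i % 2 = 1 := by rw [← PySem.Int.mod_eq_emod_of_pos h2]; exact hi
    match rest with
    | [] => simp [PySem.List.enumerate_nil, pairsOf]
    | [a] =>
      have hd : ¬ (2 ∣ i) := by omega
      simp [PySem.List.enumerate_cons, PySem.List.enumerate_nil, pairsOf, evalStepA, hd]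
    | a :: b :: t =>
      rw [PySem.List.enumerate_cons, PySem.List.enumerate_cons] at hall ⊢
      have hia : PySem.Int.mod i 2 ≠ 0 := by rw [hi]; norm_num
      have hib : PySem.Int.mod (i + 1) 2 = 0 := by
        rw [PySem.Int.mod_eq_emod_of_pos h2]; omega
      have hit : PySem.Int.mod (i + 1 + 1) 2 = 1 := by
        rw [PySem.Int.mod_eq_emod_of_pos h2]; omega
      have ha := hall (i, a) (by simp)
      have hb := hall (i + 1, b) (by simp)
      have ht : ∀ p ∈ PySem.List.enumerate t (i + 1 + 1),
          if PySem.Int.mod p.1 2 = 0 then (PySem.Int.ofStr? p.2).isSome = true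
          else ∀ c ∈ p.2.toList, c = '+' ∨ c = '-' :=
        fun p hp => hall p (by simp [hp])
      rw [if_neg hia] at ha
      simp only [List.foldl_cons]
      have step1 : evalStepA (v, 1) (i, a)
          = (v, if a.toList.count '-' % 2 = 1 then -1 else 1) := by
        have hcond : ¬ ((PySem.Int.mod (i, a).1 2 == 0) = true) := by simp; omega
        simp only [evalStepA, if_neg hcond]
        rw [sign_fold a.toList 1 ha]
        simp
      have step2 : evalStepA (v, if a.toList.count '-' % 2 = 1 then -1 else 1) (i + 1, b)
          = (pairStep v (a, b), 1) := by
        have hcondb : ((PySem.Int.mod (i + 1, b).1 2 == 0) = true) := by simp; omega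
        simp only [evalStepA, if_pos hcondb, pairStep, str_count_dash]
        by_cases hp : a.toList.count '-' % 2 = 1 <;> simp [hp]
        try ring
      rw [step1, step2, pairsOf]
      simp only [List.foldl_cons]
      exact ih t (by simp at h; omega) (i + 1 + 1) (pairStep v (a, b)) hit ht

-- pairStep's fold is the difference of the two group sums B computes.
theorem foldl_pairStep (pairs : List (String × String)) : ∀ (v : Int),
    pairs.foldl pairStep v
      = v + ((pairs.filter (fun p => PySem.Chars.count p.1.toList "-".toList % 2 != 1)).map
              (fun p => (PySem.Int.ofStr? p.2).getD 0)).sum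
          - ((pairs.filter (fun p => PySem.Chars.count p.1.toList "-".toList % 2 == 1)).map
              (fun p => (PySem.Int.ofStr? p.2).getD 0)).sum := by
  induction pairs with
  | nil => intro v; simp
  | cons p t ih =>
    intro v
    simp only [List.foldl_cons, List.filter_cons]
    by_cases hp : PySem.Chars.count p.1.toList "-".toList % 2 = 1
    · have hb : (PySem.Str.count p.1 "-" % 2 == 1) = true := by
        rw [PySem.Str.count_eq, hp]; rfl
      have hb2 : (PySem.Chars.count p.1.toList "-".toList % 2 != 1) = false := by
        rw [hp]; rfl
      have hb3 : (PySem.Chars.count p.1.toList "-".toList % 2 == 1) = true := by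
        rw [hp]; rfl
      rw [ih]
      simp only [pairStep, hb, hb2, hb3, Bool.false_eq_true, if_true, if_false,
        List.map_cons, List.sum_cons]
      ring
    · have hb : (PySem.Str.count p.1 "-" % 2 == 1) = false := by
        rw [PySem.Str.count_eq]; exact beq_eq_false_iff_ne.mpr hp
      have hb2 : (PySem.Chars.count p.1.toList "-".toList % 2 != 1) = true := bne_iff_ne.mpr hp
      have hb3 : (PySem.Chars.count p.1.toList "-".toList % 2 == 1) = false := beq_eq_false_iff_ne.mpr hp
      rw [ih]
      simp only [pairStep, hb, hb2, hb3, Bool.false_eq_true, if_true, if_false,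
        List.map_cons, List.sum_cons]
      ring

-- Parity slice recurrences for step-2 slices.
theorem s2_one {α : Type} (x : α) (xs : List α) :
    PySem.List.slice? (x :: xs) (some 1) none 2 = PySem.List.slice? xs (some 0) none 2 := by
  simp [PySem.List.slice?, PySem.List.sliceIndices]
  congr 1
  funext k
  have h1 : ((1 : Int) + 2 * (k : Int)).toNat = 2 * k + 1 := by omega
  have h2 : ((2 : Int) * (k : Int)).toNat = 2 * k := by omega
  rw [h1, h2]
  simp

theorem s2_zero {α : Type} (x : α) (xs : List α) :
    PySem.List.slice? (x :: xs) (some 0) none 2 =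
      some (x :: (PySem.List.slice? xs (some 1) none 2).getD []) := by
  cases xs with
  | nil =>
    simp [PySem.List.slice?, PySem.List.sliceIndices]
  | cons y t =>
    simp only [PySem.List.slice?, PySem.List.sliceIndices]
    norm_num
    have h0 : min (0:Int) (↑t.length + 1 + 1) = 0 := by omega
    simp only [h0]
    have hc : (if (0:Int) ≤ ↑t.length + 1 then (((t.length:Int) + 1 + 1 - 0 + 2 - 1) / 2).toNat else 0)
        = (if 0 < t.length then (((t.length:Int) + 2 - 1) / 2).toNat else 0) + 1 := by
      split_ifs <;> omega
    rw [hc, List.range_succ_eq_map]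
    simp only [List.filterMap_cons, List.filterMap_map]
    norm_num
    congr 1
    funext k
    have h1 : ((2 : Int) * (↑k + 1)).toNat = 2 * k + 2 := by omega
    have h2 : ((1 : Int) + 2 * (k : Int)).toNat = 2 * k + 1 := by omega
    rw [h1, h2]
    simp

-- Every-other-element selector; the value of a step-2 slice.
def eo {α : Type} : List α → List α
  | [] => []
  | [x] => [x]
  | x :: _ :: t => x :: eo t

theorem eo_cons {α : Type} (x : α) (xs : List α) : eo (x :: xs) = x :: eo xs.tail := by
  cases xs <;> simp [eo]

theorem slice2_eq {α : Type} : ∀ (n : Nat) (xs : List α), xs.length ≤ n →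
    PySem.List.slice? xs (some 0) none 2 = some (eo xs)
      ∧ PySem.List.slice? xs (some 1) none 2 = some (eo xs.tail) := by
  intro n
  induction n with
  | zero =>
    intro xs h
    cases xs with
    | nil => exact ⟨rfl, rfl⟩
    | cons a t => simp at h
  | succ m ih =>
    intro xs h
    cases xs with
    | nil => exact ⟨rfl, rfl⟩
    | cons a t =>
      have ht := ih t (by simp at h; omega)
      constructor
      · rw [s2_zero, ht.2, eo_cons]
        rfl
      · rw [s2_one, ht.1]
        rfl

theorem eo_pairs_fst : ∀ (n : Nat) (rest : List String), rest.length ≤ n →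
    rest.length % 2 = 0 → eo rest = (pairsOf rest).map (·.1) := by
  intro n
  induction n with
  | zero => intro rest h _; cases rest with
    | nil => rfl
    | cons a t => simp at h
  | succ m ih =>
    intro rest h he
    match rest with
    | [] => rfl
    | [a] => simp at he
    | a :: b :: t =>
      simp only [eo, pairsOf, List.map_cons]
      rw [ih t (by simp at h; omega) (by simp at he ⊢; omega)]

theorem eo_pairs_snd : ∀ (n : Nat) (rest : List String), rest.length ≤ n →
    rest.length % 2 = 0 → eo rest.tail = (pairsOf rest).map (·.2) := by
  intro n
  induction n with
  | zero => intro rest h _; cases rest with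
    | nil => rfl
    | cons a t => simp at h
  | succ m ih =>
    intro rest h he
    match rest with
    | [] => rfl
    | [a] => simp at he
    | a :: b :: t =>
      simp only [List.tail_cons, pairsOf, List.map_cons]
      cases t with
      | nil => rfl
      | cons c u =>
        simp only [eo]
        have hu := ih (c :: u) (by simp at h ⊢; omega) (by simp at he ⊢; omega)
        simp only [List.tail_cons] at hu
        rw [hu]
theorem neg_one_pow_parity (c : Nat) :
    ((-1 : Int) ^ c) = if c % 2 = 1 then -1 else 1 := by
  rcases Nat.even_or_odd c with hc | hc
  · rw [hc.neg_one_pow, if_neg (by rw [Nat.even_iff] at hc; omega)]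
  · rw [hc.neg_one_pow, if_pos (by rw [Nat.odd_iff] at hc; omega)]

theorem sign_decide_pos (c : Nat) : decide (0 < ((-1:Int)^c)) = (c % 2 != 1) := by
  rw [neg_one_pow_parity]
  by_cases h : c % 2 = 1
  · simp [h]
  · simp [h]; omega

theorem sign_decide_neg (c : Nat) : decide (((-1:Int)^c) < 0) = (c % 2 == 1) := by
  rw [neg_one_pow_parity]
  by_cases h : c % 2 = 1
  · simp [h]
  · simp [h]

-- B's staged computation, on an odd token list, is pairStep's fold.
theorem alt_eq_fold (s : String) (n0 : String) (rest : List String)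
    (hps : PySem.Str.split₀ s = n0 :: rest) (heven : rest.length % 2 = 0) :
    eval_line_alt s = (pairsOf rest).foldl pairStep ((PySem.Int.ofStr? n0).getD 0) := by
  unfold eval_line_alt
  rw [hps]
  dsimp only
  have hsl := slice2_eq (n0 :: rest).length (n0 :: rest) le_rfl
  rw [hsl.1, hsl.2, eo_cons]
  simp only [List.tail_cons, Option.getD_some]
  rw [eo_pairs_fst rest.length rest le_rfl heven,
      eo_pairs_snd rest.length rest le_rfl heven]
  set pairs := pairsOf rest with hpairs
  rw [List.map_map, List.zip_cons_cons, List.zip_map']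
  simp only [List.filter_cons]
  norm_num
  rw [List.filter_map, List.filter_map, List.map_map, List.map_map]
  have hpos : (List.filter ((fun p => decide (0 < p.1)) ∘ fun x => ((-1:Int) ^ PySem.Chars.count x.1.toList "-".toList, x.2)) pairs)
      = pairs.filter (fun p => PySem.Chars.count p.1.toList "-".toList % 2 != 1) := by
    apply List.filter_congr
    intro p _
    simp only [Function.comp]
    exact sign_decide_pos _
  have hneg : (List.filter ((fun p => decide (p.1 < 0)) ∘ fun x => ((-1:Int) ^ PySem.Chars.count x.1.toList "-".toList, x.2)) pairs)
      = pairs.filter (fun p => PySem.Chars.count p.1.toList "-".toList % 2 == 1) := by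
    apply List.filter_congr
    intro p _
    simp only [Function.comp]
    exact sign_decide_neg _
  rw [hpos, hneg, foldl_pairStep]
  simp only [Function.comp_def]

-- ===== VERDICT (by name: the statement is the Claim_ definition above) =====
theorem eval_line_spec : Claim_equal_eval_line := by
  intro s _ hpre
  unfold Pre_eval_line at hpre
  rw [Bool.and_eq_true] at hpre
  obtain ⟨hoddb, hallb⟩ := hpre
  have hodd : (PySem.Str.split₀ s).length % 2 = 1 := by simpa using hoddb
  rw [List.all_eq_true] at hallb
  have hall := fun p hp => pre_tok_prop p (hallb p hp)
  unfold Spec_eval_line eval_line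
  match hps : PySem.Str.split₀ s with
  | [] => rw [hps] at hodd; simp at hodd
  | n0 :: rest =>
    rw [hps] at hall hodd
    have heven : rest.length % 2 = 0 := by simp at hodd; omega
    rw [alt_eq_fold s n0 rest hps heven]
    rw [PySem.List.enumerate_cons] at hall ⊢
    have h0 : PySem.Int.mod (0:Int) 2 = 0 := by decide
    have ha := hall (0, n0) (by simp)
    rw [if_pos h0] at ha
    simp only [List.foldl_cons]
    have step0 : evalStepA (0, 1) (0, n0) = ((PySem.Int.ofStr? n0).getD 0, 1) := by
      simp [evalStepA]
    rw [step0]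
    exact main_loop rest.length rest le_rfl 1 _ (by decide)
      (fun p hp => hall p (by simp [hp]))
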